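-- pv_equiv track=rewrite | github.com/ramonfragoso/tst_assignments | unidade6/feijoada/feijoada.py | quantos_comeram
-- ===== SOURCE A (Python) =====
-- def quantos_comeram(N, fila):
-- 	comedores = 0
-- 	for i in range(0, len(fila)):
-- 		if N >= fila[i]:
-- 			comedores += fila[i]
-- 			N -= fila[i]
-- 		else: break
-- 	return comedores
-- ===== SOURCE B (Python) =====
-- from itertools import accumulate, takewhile
--
-- def quantos_comeram(N, fila):
--     prefixes = list(accumulate(fila))
--     eaten = list(takewhile(lambda p: p <= N, prefixes))
--     return eaten[-1] if eaten else 0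
-- ===== Notes on version B (the rewrite author's own statement) =====
-- stated objective: idiomatic
-- what changed: Replaces the mutating running-budget loop with a two-phase pipeline: build the inclusive prefix-sum table with itertools.accumulate, then takewhile the prefixes <= N and return the last kept prefix (0 if none).
import Mathlib
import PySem

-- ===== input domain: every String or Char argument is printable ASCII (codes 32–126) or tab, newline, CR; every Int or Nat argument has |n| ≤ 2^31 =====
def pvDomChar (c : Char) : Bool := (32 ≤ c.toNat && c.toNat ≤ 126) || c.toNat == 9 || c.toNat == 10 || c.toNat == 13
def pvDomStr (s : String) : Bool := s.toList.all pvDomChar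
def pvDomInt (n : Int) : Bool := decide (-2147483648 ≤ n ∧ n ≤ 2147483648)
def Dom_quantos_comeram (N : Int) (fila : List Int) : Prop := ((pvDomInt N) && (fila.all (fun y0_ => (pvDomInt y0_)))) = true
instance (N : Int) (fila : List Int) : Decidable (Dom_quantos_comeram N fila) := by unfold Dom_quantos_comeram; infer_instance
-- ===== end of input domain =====

-- B rewrites the running-budget loop as: build the inclusive prefix-sum table, takeWhile ≤ N, last (or 0); idiomatic pipeline, same cost.

-- ===== PORT A =====
-- loop over fila carrying the remaining budget N and the accumulator comedores; 'break' = return the accumulator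
def quantosAux (N comedores : Int) : List Int → Int
  | [] => comedores
  | x :: xs => if N ≥ x then quantosAux (N - x) (comedores + x) xs else comedores

def quantos_comeram (N : Int) (fila : List Int) : Int := quantosAux N 0 fila

-- ===== PORT B =====
-- itertools.accumulate: inclusive prefix sums starting from s
def prefixes (s : Int) : List Int → List Int
  | [] => []
  | x :: xs => (s + x) :: prefixes (s + x) xs

def quantos_comeram_alt (N : Int) (fila : List Int) : Int :=
  (((prefixes 0 fila).takeWhile (fun p => p ≤ N)).getLast?).getD 0

-- ===== PRECONDITION & SPEC =====
def Spec_quantos_comeram (N : Int) (fila : List Int) (out : Int) : Prop := out = quantos_comeram_alt N fila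
instance (N : Int) (fila : List Int) (out : Int) : Decidable (Spec_quantos_comeram N fila out) := by unfold Spec_quantos_comeram; infer_instance

-- ===== CLAIM (what is proved, stated in full; the proofs are below) =====
def Claim_equal_quantos_comeram : Prop := ∀ (N : Int) (fila : List Int), Dom_quantos_comeram N fila → Spec_quantos_comeram N fila (quantos_comeram N fila)

-- ===== LEMMAS AND PROOFS =====
theorem quantosAux_eq (fila : List Int) : ∀ (N com : Int),
    quantosAux N com fila = (((prefixes com fila).takeWhile (fun p => p ≤ N + com)).getLast?).getD com := by
  induction fila with
  | nil => intro N com; simp [quantosAux, prefixes]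
  | cons x xs ih =>
    intro N com
    simp only [quantosAux, prefixes, List.takeWhile]
    by_cases h : N ≥ x
    · have hle : com + x ≤ N + com := by omega
      simp only [if_pos h, hle, decide_true]
      rw [ih (N - x) (com + x)]
      have harg : N - x + (com + x) = N + com := by ring
      rw [harg]
      cases hts : (prefixes (com + x) xs).takeWhile (fun p => p ≤ N + com) with
      | nil => simp
      | cons a t => simp [List.getLast?_cons]
    · have hgt : ¬ (com + x ≤ N + com) := by omega
      simp [if_neg h, hgt]

-- ===== VERDICT (by name: the statement is the Claim_ definition above) =====
theorem quantos_comeram_spec : Claim_equal_quantos_comeram := by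
  intro N fila _
  unfold Spec_quantos_comeram quantos_comeram quantos_comeram_alt
  rw [quantosAux_eq]
  simp
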